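-- pv_equiv track=rewrite | github.com/ciaranclear/consoleEnigma | display_enigma.py | _add_turnover_settings
-- ===== SOURCE A (Python) =====
-- def _add_turnover_settings(rotor_dict):
--
-- 	ring_characters = rotor_dict["RING_CHARACTERS"]
-- 	turnover_characters = rotor_dict["TURNOVER_CHARACTERS"]
-- 	turnover_list = [" - " for i in range(len(ring_characters))]
-- 	for turnover_character in turnover_characters:
-- 		for i in range(len(ring_characters)):
-- 			if ring_characters[i] == turnover_character:
-- 				turnover_list[i] = "|^|"
-- 	return turnover_list
-- ===== SOURCE B (Python) =====
-- def _add_turnover_settings(rotor_dict):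
-- 	ring_characters = rotor_dict["RING_CHARACTERS"]
-- 	turnover_set = set(rotor_dict["TURNOVER_CHARACTERS"])
-- 	return ["|^|" if c in turnover_set else " - " for c in ring_characters]
-- ===== Notes on version B (the rewrite author's own statement) =====
-- stated objective: faster
-- what changed: Replaces the nested 'for each turnover char, rescan every ring index and set a slot' loops over a preallocated list with a precomputed membership set and one single comprehension pass over the ring characters.
import Mathlib
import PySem

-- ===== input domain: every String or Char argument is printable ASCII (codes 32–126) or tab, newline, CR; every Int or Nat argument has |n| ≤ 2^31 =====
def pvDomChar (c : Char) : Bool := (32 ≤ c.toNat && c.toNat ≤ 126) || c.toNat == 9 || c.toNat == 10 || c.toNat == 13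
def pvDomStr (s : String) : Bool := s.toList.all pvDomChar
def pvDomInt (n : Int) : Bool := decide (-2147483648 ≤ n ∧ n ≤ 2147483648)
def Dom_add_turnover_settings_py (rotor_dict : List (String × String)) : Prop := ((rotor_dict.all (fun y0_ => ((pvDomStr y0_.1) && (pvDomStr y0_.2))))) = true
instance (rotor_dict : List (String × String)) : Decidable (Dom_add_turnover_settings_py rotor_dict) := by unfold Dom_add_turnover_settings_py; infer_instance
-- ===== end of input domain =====

-- B replaces A's nested "for each turnover char, rescan every ring index" loops with a
-- precomputed membership set and one single pass over the ring characters (faster in a timing run's mechanism: asymptotic).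

-- ===== PORT A =====
-- nested loops: for each turnover character, scan all ring indices and overwrite slots
def add_turnover_settings_py (rotor_dict : List (String × String)) : List String :=
  match (PySem.Dict.mk rotor_dict).get? "RING_CHARACTERS",
        (PySem.Dict.mk rotor_dict).get? "TURNOVER_CHARACTERS" with
  | some ring, some tos =>
    let ringC := ring.toList
    let turnover_list := List.replicate ringC.length " - "
    tos.toList.foldl (fun tl tc =>
      (List.range ringC.length).foldl (fun tl i =>
        if ringC[i]? == some tc then tl.set i "|^|" else tl) tl) turnover_list
  | _, _ => []  -- KeyError in Python: excluded by Pre_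

-- ===== PORT B =====
def add_turnover_settings_py_alt (rotor_dict : List (String × String)) : List String :=
  match (PySem.Dict.mk rotor_dict).get? "RING_CHARACTERS" with
  | none => []  -- KeyError in Python: excluded by Pre_
  | some ring =>
    match (PySem.Dict.mk rotor_dict).get? "TURNOVER_CHARACTERS" with
    | none => []  -- KeyError in Python: excluded by Pre_
    | some tos =>
      let marks := PySem.Set.ofList tos.toList
      ring.toList.map (fun c => if PySem.Set.contains marks c then "|^|" else " - ")

-- ===== PRECONDITION & SPEC =====
-- Pre_: both keys present (Python raises KeyError otherwise)
def Pre_add_turnover_settings_py (rotor_dict : List (String × String)) : Prop :=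
  ((PySem.Dict.mk rotor_dict).get? "RING_CHARACTERS").isSome = true ∧
  ((PySem.Dict.mk rotor_dict).get? "TURNOVER_CHARACTERS").isSome = true
instance (rotor_dict : List (String × String)) : Decidable (Pre_add_turnover_settings_py rotor_dict) := by unfold Pre_add_turnover_settings_py; infer_instance

def pvWitness_add_turnover_settings_py : (List (String × String)) :=
  [("RING_CHARACTERS", "ABCDE"), ("TURNOVER_CHARACTERS", "BD")]

def Spec_add_turnover_settings_py (rotor_dict : List (String × String)) (out : List String) : Prop := out = add_turnover_settings_py_alt rotor_dict
instance (rotor_dict : List (String × String)) (out : List String) : Decidable (Spec_add_turnover_settings_py rotor_dict out) := by unfold Spec_add_turnover_settings_py; infer_instance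

-- ===== CLAIM (what is proved, stated in full; the proofs are below) =====
def Claim_equal_add_turnover_settings_py : Prop := ∀ (rotor_dict : List (String × String)), Dom_add_turnover_settings_py rotor_dict → Pre_add_turnover_settings_py rotor_dict → Spec_add_turnover_settings_py rotor_dict (add_turnover_settings_py rotor_dict)

-- ===== LEMMAS AND PROOFS =====

-- inner loop: length is preserved
theorem pv_inner_length (ringC : List Char) (tc : Char) (tl : List String) (n : Nat) :
    ((List.range n).foldl (fun tl i =>
      if ringC[i]? == some tc then tl.set i "|^|" else tl) tl).length = tl.length := by
  induction n generalizing tl with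
  | zero => rfl
  | succ n ih =>
    rw [List.range_succ, List.foldl_append]
    simp only [List.foldl_cons, List.foldl_nil]
    split
    · rw [List.length_set, ih]
    · rw [ih]

-- inner loop, pointwise
theorem pv_inner_get (ringC : List Char) (tc : Char) (tl : List String) (n : Nat) (j : Nat) :
    ((List.range n).foldl (fun tl i =>
      if ringC[i]? == some tc then tl.set i "|^|" else tl) tl)[j]? =
    if j < n ∧ ringC[j]? = some tc then (if j < tl.length then some "|^|" else none)
    else tl[j]? := by
  induction n generalizing tl with
  | zero => simp
  | succ n ih =>
    rw [List.range_succ, List.foldl_append]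
    simp only [List.foldl_cons, List.foldl_nil]
    have hiff : ∀ P : Prop, j ≠ n → ((j < n + 1 ∧ P) ↔ (j < n ∧ P)) := by
      intro P hj
      constructor <;> rintro ⟨h1, h2⟩ <;> exact ⟨by omega, h2⟩
    by_cases h : (ringC[n]? == some tc) = true
    · have hc : ringC[n]? = some tc := by rwa [beq_iff_eq] at h
      rw [if_pos h, List.getElem?_set, pv_inner_length, ih]
      by_cases hj : n = j
      · subst hj
        rw [if_pos rfl, if_pos (show n < n + 1 ∧ ringC[n]? = some tc from ⟨Nat.lt_succ_self n, hc⟩)]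
      · rw [if_neg hj, if_congr (hiff _ (Ne.symm hj)) rfl rfl]
    · have hc : ringC[n]? ≠ some tc := by simpa using h
      rw [if_neg h, ih]
      by_cases hj : j = n
      · subst hj
        rw [if_neg (by omega : ¬ (j < j ∧ ringC[j]? = some tc)),
            if_neg (fun hh => hc hh.2)]
      · rw [if_congr (hiff _ hj) rfl rfl]

-- outer loop, pointwise: a slot is "|^|" iff some turnover character matches it
theorem pv_outer_get (ringC : List Char) (tcs : List Char) (tl : List String) (j : Nat) :
    (tcs.foldl (fun tl tc =>
      (List.range ringC.length).foldl (fun tl i =>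
        if ringC[i]? == some tc then tl.set i "|^|" else tl) tl) tl)[j]? =
    if ∃ tc ∈ tcs, ringC[j]? = some tc then (if j < tl.length then some "|^|" else none)
    else tl[j]? := by
  induction tcs generalizing tl with
  | nil => simp
  | cons c tcs ih =>
    simp only [List.foldl_cons]
    rw [ih, pv_inner_length, pv_inner_get]
    by_cases hex : ∃ tc ∈ tcs, ringC[j]? = some tc
    · obtain ⟨tc, htc, he⟩ := hex
      rw [if_pos (show ∃ tc ∈ tcs, ringC[j]? = some tc from ⟨tc, htc, he⟩),
          if_pos (show ∃ tc ∈ c :: tcs, ringC[j]? = some tc from ⟨tc, List.mem_cons_of_mem c htc, he⟩)]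
    · rw [if_neg hex]
      by_cases hc : ringC[j]? = some c
      · have hjlen : j < ringC.length := (List.getElem?_eq_some_iff.mp hc).1
        rw [if_pos (show j < ringC.length ∧ ringC[j]? = some c from ⟨hjlen, hc⟩),
            if_pos (show ∃ tc ∈ c :: tcs, ringC[j]? = some tc from ⟨c, List.mem_cons_self, hc⟩)]
      · rw [if_neg (fun hh => hc hh.2),
            if_neg (by rintro ⟨tc, htc, he⟩
                       rcases List.mem_cons.mp htc with rfl | hmem
                       · exact hc he
                       · exact hex ⟨tc, hmem, he⟩)]

-- ===== VERDICT (by name: the statement is the Claim_ definition above) =====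
theorem add_turnover_settings_py_spec : Claim_equal_add_turnover_settings_py := by
  intro rotor_dict _ hpre
  obtain ⟨h1, h2⟩ := hpre
  obtain ⟨ring, hr⟩ := Option.isSome_iff_exists.mp h1
  obtain ⟨tos, ht⟩ := Option.isSome_iff_exists.mp h2
  unfold Spec_add_turnover_settings_py add_turnover_settings_py add_turnover_settings_py_alt
  rw [hr, ht]
  apply List.ext_getElem?
  intro j
  rw [pv_outer_get, List.length_replicate, List.getElem?_map]
  cases hcj : ring.toList[j]? with
  | none =>
    have hjlen : ring.toList.length ≤ j := List.getElem?_eq_none_iff.mp hcj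
    rw [if_neg (by rintro ⟨tc, _, he⟩; cases he),
        List.getElem?_replicate, if_neg (by omega)]
    rfl
  | some c =>
    have hjlen : j < ring.toList.length := (List.getElem?_eq_some_iff.mp hcj).1
    by_cases hin : c ∈ tos.toList
    · have hcon : PySem.Set.contains (PySem.Set.ofList tos.toList) c = true := by
        rw [PySem.Set.contains_iff, PySem.Set.mem_ofList]; exact hin
      rw [if_pos (show ∃ tc ∈ tos.toList, some c = some tc from ⟨c, hin, rfl⟩),
          if_pos hjlen, Option.map_some, if_pos hcon]
    · have hcon : ¬ PySem.Set.contains (PySem.Set.ofList tos.toList) c = true := by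
        rw [PySem.Set.contains_iff, PySem.Set.mem_ofList]; exact hin
      rw [if_neg (by rintro ⟨tc, htc, he⟩; cases he; exact hin htc),
          List.getElem?_replicate, if_pos hjlen, Option.map_some, if_neg hcon]
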